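-- pv_equiv track=rewrite | github.com/JordyBottelier/arpsas | schema_matching/feature_classes/syntax_feature_model.py | check_upper_lower_digit
-- ===== SOURCE A (Python) =====
-- def check_upper_lower_digit(word):
-- 	has_upper = False
-- 	has_lower = False
-- 	has_digit = False
--
-- 	for char in word:
-- 		if char.isupper():
-- 			has_upper = True
-- 		if char.islower():
-- 			has_lower = True
-- 		if char.isdigit():
-- 			has_digit = True
-- 	return [has_upper, has_lower, has_digit]
-- ===== SOURCE B (Python) =====
-- def check_upper_lower_digit(word):
--     return [any(c.isupper() for c in word),
--             any(c.islower() for c in word),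
--             any(c.isdigit() for c in word)]
-- ===== Notes on version B (the rewrite author's own statement) =====
-- stated objective: idiomatic
-- what changed: Replaced the single flag-accumulating loop with three independent short-circuiting any() scans, one per character class, with no mutable state.
import Mathlib
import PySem

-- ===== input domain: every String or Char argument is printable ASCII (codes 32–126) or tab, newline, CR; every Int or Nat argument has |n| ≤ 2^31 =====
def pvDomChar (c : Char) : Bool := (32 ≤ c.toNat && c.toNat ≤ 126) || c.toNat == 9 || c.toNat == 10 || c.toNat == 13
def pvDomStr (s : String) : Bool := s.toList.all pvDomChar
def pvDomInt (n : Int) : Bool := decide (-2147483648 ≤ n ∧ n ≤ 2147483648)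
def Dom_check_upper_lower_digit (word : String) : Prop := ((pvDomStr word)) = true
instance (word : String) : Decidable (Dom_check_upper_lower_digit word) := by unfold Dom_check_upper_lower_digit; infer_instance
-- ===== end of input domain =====

-- B replaces A's single flag-setting loop with three independent any() scans (idiomatic; no mutable state).

-- ===== PORT A =====
-- one pass, three boolean flags updated in order, then returned as a list
def check_upper_lower_digit (word : String) : List Bool :=
  let st := word.toList.foldl
    (fun (st : Bool × Bool × Bool) c =>
      let st := if PySem.Chars.isupper c then (true, st.2.1, st.2.2) else st
      let st := if PySem.Chars.islower c then (st.1, true, st.2.2) else st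
      let st := if PySem.Chars.isdigit c then (st.1, st.2.1, true) else st
      st)
    (false, false, false)
  [st.1, st.2.1, st.2.2]

-- ===== PORT B =====
-- three independent membership scans (any over the characters)
def check_upper_lower_digit_alt (word : String) : List Bool :=
  [word.toList.any (fun c => PySem.Chars.isupper c),
   word.toList.any (fun c => PySem.Chars.islower c),
   word.toList.any (fun c => PySem.Chars.isdigit c)]

-- ===== PRECONDITION & SPEC =====
def Spec_check_upper_lower_digit (word : String) (out : List Bool) : Prop := out = check_upper_lower_digit_alt word
instance (word : String) (out : List Bool) : Decidable (Spec_check_upper_lower_digit word out) := by unfold Spec_check_upper_lower_digit; infer_instance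

-- ===== CLAIM (what is proved, stated in full; the proofs are below) =====
def Claim_equal_check_upper_lower_digit : Prop := ∀ (word : String), Dom_check_upper_lower_digit word → Spec_check_upper_lower_digit word (check_upper_lower_digit word)

-- ===== LEMMAS AND PROOFS =====
-- loop invariant: the fold ORs each flag with whether the suffix contains a qualifying char
theorem pv_fold_inv (l : List Char) (u v d : Bool) :
    l.foldl
      (fun (st : Bool × Bool × Bool) c =>
        let st := if PySem.Chars.isupper c then (true, st.2.1, st.2.2) else st
        let st := if PySem.Chars.islower c then (st.1, true, st.2.2) else st
        let st := if PySem.Chars.isdigit c then (st.1, st.2.1, true) else st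
        st)
      (u, v, d)
    = (u || l.any (fun c => PySem.Chars.isupper c),
       v || l.any (fun c => PySem.Chars.islower c),
       d || l.any (fun c => PySem.Chars.isdigit c)) := by
  induction l generalizing u v d with
  | nil => simp
  | cons c t ih =>
    simp only [List.foldl_cons, List.any_cons]
    by_cases hu : PySem.Chars.isupper c <;>
    by_cases hl : PySem.Chars.islower c <;>
    by_cases hd : PySem.Chars.isdigit c <;>
    simp [hu, hl, hd, ih]

-- ===== VERDICT (by name: the statement is the Claim_ definition above) =====
theorem check_upper_lower_digit_spec : Claim_equal_check_upper_lower_digit := by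
  intro word _
  unfold Spec_check_upper_lower_digit check_upper_lower_digit check_upper_lower_digit_alt
  simp [pv_fold_inv]
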